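-- pv_equiv track=rewrite | github.com/B-T-D/DCS_work_backup | CH6_text_documents_and_dna/exercises_6_7/10_ssr_longest.py | longest_ssr
-- ===== SOURCE A (Python) =====
-- def longest_ssr(dna):
--     """
--     Returns:
--         most_repeated (str): The two-character substring ('dinucleotide') that is
--         repeated the most times. If more than one pairs tie for most repetitions,
--         returns first one to be repeated that many times.
--     """
--     max_repeats = 0
--     most_repeated = ''
--     for i in range(0, len(dna) - 1):
--         d = dna[i:i+2]
--         j = 2
--         repeats = 0
--         while dna[i+j:i+j+2] == d and j <= len(dna):
--             repeats += 1
--             j += 2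
--         if repeats > max_repeats:
--             max_repeats = repeats
--             most_repeated = d
--     return most_repeated
-- ===== SOURCE B (Python) =====
-- def longest_ssr(dna):
--     """Backward DP over dinucleotide positions: count[i] = 1 + count[i+2] when
--     dna[i:i+2] == dna[i+2:i+4]; then one forward scan for the first strict max."""
--     n = len(dna)
--     count = [0] * n
--     for i in range(n - 4, -1, -1):
--         if dna[i] == dna[i + 2] and dna[i + 1] == dna[i + 3]:
--             count[i] = count[i + 2] + 1
--     best = 0
--     most_repeated = ''
--     for i in range(n - 1):
--         if count[i] > best:
--             best = count[i]
--             most_repeated = dna[i:i + 2]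
--     return most_repeated
-- ===== Notes on version B (the rewrite author's own statement) =====
-- stated objective: faster
-- what changed: A rescans forward from every position i (O(n^2) worst case); B computes the repeat counts for all positions in one backward DP pass (count[i] = count[i+2] + 1 when adjacent dinucleotides match) followed by one forward scan for the first strict maximum.
import Mathlib
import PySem

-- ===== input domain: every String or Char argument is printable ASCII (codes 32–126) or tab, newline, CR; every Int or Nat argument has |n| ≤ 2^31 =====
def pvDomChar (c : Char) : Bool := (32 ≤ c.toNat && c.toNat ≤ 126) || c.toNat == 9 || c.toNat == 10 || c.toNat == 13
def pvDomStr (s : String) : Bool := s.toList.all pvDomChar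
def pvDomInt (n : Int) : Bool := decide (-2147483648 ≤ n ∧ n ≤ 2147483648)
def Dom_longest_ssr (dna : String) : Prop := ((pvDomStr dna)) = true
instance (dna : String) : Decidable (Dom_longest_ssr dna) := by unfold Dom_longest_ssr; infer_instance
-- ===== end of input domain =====

-- B replaces A's quadratic rescan (for each i, re-count the repeats after i) by a
-- single backward DP pass count[i] = count[i+2] + 1 plus one forward scan.

-- ===== PORT A =====
-- A's inner while loop: 'while dna[i+j:i+j+2] == d and j <= len(dna): repeats += 1; j += 2'.
-- fuel only guards totality; it is never exhausted (the loop stops once j exceeds len(dna)).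
def longestSsrWhile (cs : List Char) (i : Int) (d : List Char) : Nat → Int → Int → Int
  | 0, _, repeats => repeats
  | fuel + 1, j, repeats =>
    if PySem.List.slice cs (some (i + j)) (some (i + j + 2)) = d ∧ j ≤ (cs.length : Int)
    then longestSsrWhile cs i d fuel (j + 2) (repeats + 1)
    else repeats

def longest_ssr (dna : String) : String :=
  let cs := dna.toList
  let st := (PySem.List.pyRange 0 ((cs.length : Int) - 1) 1).foldl
    (fun (st : Int × List Char) i =>
      let d := PySem.List.slice cs (some i) (some (i + 2))
      let repeats := longestSsrWhile cs i d (cs.length + 2) 2 0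
      if st.1 < repeats then (repeats, d) else st)
    (0, [])
  String.ofList st.2

-- ===== PORT B =====
-- transliteration of Source B; pyGetD is used for indexing (every index is provably in range here)
def longest_ssr_alt (dna : String) : String :=
  let cs := dna.toList
  let n : Int := cs.length
  let count : List Int := (PySem.List.pyRange (n - 4) (-1) (-1)).foldl
    (fun (count : List Int) i =>
      if PySem.List.pyGet? cs i = PySem.List.pyGet? cs (i + 2) ∧
         PySem.List.pyGet? cs (i + 1) = PySem.List.pyGet? cs (i + 3)
      then count.set i.toNat (PySem.List.pyGetD count (i + 2) 0 + 1)
      else count)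
    (List.replicate cs.length 0)
  let st := (PySem.List.pyRange 0 (n - 1) 1).foldl
    (fun (st : Int × List Char) i =>
      if st.1 < PySem.List.pyGetD count i 0
      then (PySem.List.pyGetD count i 0, PySem.List.slice cs (some i) (some (i + 2)))
      else st)
    (0, [])
  String.ofList st.2

-- ===== PRECONDITION & SPEC =====
def Spec_longest_ssr (dna : String) (out : String) : Prop := out = longest_ssr_alt dna
instance (dna : String) (out : String) : Decidable (Spec_longest_ssr dna out) := by unfold Spec_longest_ssr; infer_instance

-- ===== CLAIM (what is proved, stated in full; the proofs are below) =====
def Claim_equal_longest_ssr : Prop := ∀ (dna : String), Dom_longest_ssr dna → Spec_longest_ssr dna (longest_ssr dna)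

-- ===== LEMMAS AND PROOFS =====

-- the dinucleotide at position i
def dnuc (cs : List Char) (i : Nat) : List Char := (cs.drop i).take 2

-- number of consecutive tandem repeats after the block at position i (the value of A's
-- inner loop and of B's DP array)
def cnt (cs : List Char) (i : Nat) : Nat :=
  if h : i + 4 ≤ cs.length ∧ dnuc cs (i + 2) = dnuc cs i then cnt cs (i + 2) + 1 else 0
termination_by cs.length - i
decreasing_by omega

lemma dnuc_length (cs : List Char) (i : Nat) (h : i + 2 ≤ cs.length) :
    (dnuc cs i).length = 2 := by
  simp [dnuc]; omega

lemma slice_eq_dnuc (cs : List Char) (a : Int) (h : 0 ≤ a) :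
    PySem.List.slice cs (some a) (some (a + 2)) = dnuc cs a.toNat := by
  rw [PySem.List.slice_toNat cs h (by omega)]
  simp [dnuc]
  congr 1
  omega

lemma cnt_eq_zero_of_ge (cs : List Char) (k : Nat) (h : cs.length < k + 4) : cnt cs k = 0 := by
  rw [cnt]; rw [dif_neg]; omega

-- two dinucleotides are equal iff the chars agree pairwise (when fully in range)
lemma dnuc_eq_iff (cs : List Char) (i : Nat) (h : i + 4 ≤ cs.length) :
    dnuc cs (i + 2) = dnuc cs i ↔
      (cs[i]'(by omega) = cs[i + 2]'(by omega) ∧ cs[i + 1]'(by omega) = cs[i + 3]'(by omega)) := by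
  have e1 : dnuc cs (i + 2) = [cs[i + 2]'(by omega), cs[i + 3]'(by omega)] := by
    apply List.ext_getElem
    · rw [dnuc_length cs _ (by omega)]; rfl
    · intro k hk _
      rw [dnuc_length cs _ (by omega)] at hk
      simp only [dnuc, List.getElem_take, List.getElem_drop]
      interval_cases k <;> simp
  have e2 : dnuc cs i = [cs[i]'(by omega), cs[i + 1]'(by omega)] := by
    apply List.ext_getElem
    · rw [dnuc_length cs _ (by omega)]; rfl
    · intro k hk _
      rw [dnuc_length cs _ (by omega)] at hk
      simp only [dnuc, List.getElem_take, List.getElem_drop]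
      interval_cases k <;> simp
  rw [e1, e2]
  constructor
  · intro he; injection he with ha hb; injection hb with hb; exact ⟨ha.symm, hb.symm⟩
  · intro ⟨ha, hb⟩; rw [ha, hb]

-- A's inner loop computes cnt: invariant form, previous block (at a+2m) equal to d = dnuc a
lemma whileRun (cs : List Char) (a : Nat) :
    ∀ (fuel m : Nat) (r : Int),
    a + 2 * m + 2 ≤ cs.length →
    dnuc cs (a + 2 * m) = dnuc cs a →
    cs.length < a + 2 * m + 2 + 2 * fuel →
    longestSsrWhile cs (a : Int) (dnuc cs a) fuel ((2 * m + 2 : Nat) : Int) r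
      = r + (cnt cs (a + 2 * m) : Int) := by
  intro fuel
  induction fuel with
  | zero => intro m r h _ hfuel; omega
  | succ fuel ih =>
    intro m r h hd hfuel
    have h1 : (a : Int) + ((2 * m + 2 : Nat) : Int) = ((a + 2 * m + 2 : Nat) : Int) := by
      push_cast; ring
    have hcond : (PySem.List.slice cs (some ((a : Int) + ((2 * m + 2 : Nat) : Int)))
        (some ((a : Int) + ((2 * m + 2 : Nat) : Int) + 2)) = dnuc cs a)
        ↔ (a + 2 * m + 4 ≤ cs.length ∧ dnuc cs (a + 2 * m + 2) = dnuc cs (a + 2 * m)) := by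
      rw [h1, slice_eq_dnuc cs _ (by positivity)]
      simp only [Int.toNat_natCast]
      constructor
      · intro he
        have hlen2 : (dnuc cs (a + 2 * m + 2)).length = 2 := by
          rw [he]; exact dnuc_length cs a (by omega)
        have hle : a + 2 * m + 4 ≤ cs.length := by
          simp [dnuc] at hlen2; omega
        exact ⟨hle, by rw [he, hd]⟩
      · intro ⟨h4, he⟩
        rw [he, hd]
    rw [longestSsrWhile]
    by_cases hch : a + 2 * m + 4 ≤ cs.length ∧ dnuc cs (a + 2 * m + 2) = dnuc cs (a + 2 * m)
    · rw [if_pos ⟨hcond.mpr hch, by have := hch.1; push_cast; omega⟩]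
      have hj : ((2 * m + 2 : Nat) : Int) + 2 = ((2 * (m + 1) + 2 : Nat) : Int) := by
        push_cast; ring
      rw [hj, ih (m + 1) (r + 1) (by omega)
        (by rw [show a + 2 * (m + 1) = a + 2 * m + 2 by ring, hch.2, hd]) (by omega)]
      have hc : cnt cs (a + 2 * m) = cnt cs (a + 2 * m + 2) + 1 := by
        rw [cnt, dif_pos hch]
      rw [show a + 2 * (m + 1) = a + 2 * m + 2 by ring, hc]
      push_cast; ring
    · rw [if_neg (by intro ⟨hs, _⟩; exact hch (hcond.mp hs))]
      have hc : cnt cs (a + 2 * m) = 0 := by rw [cnt, dif_neg hch]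
      rw [hc]; simp

-- B's DP fold invariant
def countInv (cs : List Char) (a : Int) (L : List Int) : Prop :=
  L.length = cs.length ∧
    ∀ k : Nat, k < cs.length → L.getD k 0 = if a < (k : Int) then (cnt cs k : Int) else 0

lemma countInv_of_le_neg_one (cs : List Char) (a : Int) (L : List Int) (ha : a ≤ -1)
    (h : countInv cs a L) : countInv cs (-1) L := by
  refine ⟨h.1, fun k hk => ?_⟩
  rw [h.2 k hk, if_pos (by omega), if_pos (by omega)]

lemma foldCount (cs : List Char) :
    ∀ (fuel : Nat) (a : Int) (L : List Int), a < fuel → a ≤ (cs.length : Int) - 4 →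
    countInv cs a L →
    countInv cs (-1) ((PySem.List.pyRange a (-1) (-1)).foldl
      (fun (count : List Int) i =>
        if PySem.List.pyGet? cs i = PySem.List.pyGet? cs (i + 2) ∧
           PySem.List.pyGet? cs (i + 1) = PySem.List.pyGet? cs (i + 3)
        then count.set i.toNat (PySem.List.pyGetD count (i + 2) 0 + 1)
        else count) L) := by
  intro fuel
  induction fuel with
  | zero =>
    intro a L hf ha hI
    rw [PySem.List.pyRange_neg_one_eq_nil (by omega)]
    exact countInv_of_le_neg_one cs a L (by omega) hI
  | succ fuel ih =>
    intro a L hf ha hI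
    by_cases h0 : a ≤ -1
    · rw [PySem.List.pyRange_neg_one_eq_nil (by omega)]
      exact countInv_of_le_neg_one cs a L h0 hI
    · have ha0 : 0 ≤ a := by omega
      have hlen : a.toNat + 4 ≤ cs.length := by omega
      rw [PySem.List.pyRange_neg_one_cons (by omega), List.foldl_cons]
      apply ih (a - 1) _ (by omega) (by omega)
      obtain ⟨hL, hV⟩ := hI
      have q0 : PySem.List.pyGet? cs a = cs[a.toNat]? := by
        rw [show a = ((a.toNat : Nat) : Int) by omega, PySem.List.pyGet?_natCast,
            Int.toNat_natCast]
      have q1 : PySem.List.pyGet? cs (a + 1) = cs[a.toNat + 1]? := by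
        rw [show a + 1 = ((a.toNat + 1 : Nat) : Int) by omega, PySem.List.pyGet?_natCast]
      have q2 : PySem.List.pyGet? cs (a + 2) = cs[a.toNat + 2]? := by
        rw [show a + 2 = ((a.toNat + 2 : Nat) : Int) by omega, PySem.List.pyGet?_natCast]
      have q3 : PySem.List.pyGet? cs (a + 3) = cs[a.toNat + 3]? := by
        rw [show a + 3 = ((a.toNat + 3 : Nat) : Int) by omega, PySem.List.pyGet?_natCast]
      have hcond : (PySem.List.pyGet? cs a = PySem.List.pyGet? cs (a + 2) ∧
          PySem.List.pyGet? cs (a + 1) = PySem.List.pyGet? cs (a + 3))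
          ↔ dnuc cs (a.toNat + 2) = dnuc cs a.toNat := by
        rw [q0, q1, q2, q3, dnuc_eq_iff cs a.toNat hlen,
            List.getElem?_eq_getElem (show a.toNat < cs.length by omega),
            List.getElem?_eq_getElem (show a.toNat + 1 < cs.length by omega),
            List.getElem?_eq_getElem (show a.toNat + 2 < cs.length by omega),
            List.getElem?_eq_getElem (show a.toNat + 3 < cs.length by omega)]
        simp
      split
      · next hifc =>
        have hchain : a.toNat + 4 ≤ cs.length ∧ dnuc cs (a.toNat + 2) = dnuc cs a.toNat :=
          ⟨hlen, hcond.mp hifc⟩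
        have hread : PySem.List.pyGetD L (a + 2) 0 = (cnt cs (a.toNat + 2) : Int) := by
          rw [show a + 2 = ((a.toNat + 2 : Nat) : Int) by omega]
          rw [PySem.List.pyGetD_eq_getElem L 0 (by omega) (by push_cast; omega)]
          have hv2 := hV (a.toNat + 2) (by omega)
          rw [List.getD_eq_getElem?_getD,
              List.getElem?_eq_getElem (show a.toNat + 2 < L.length by omega),
              Option.getD_some] at hv2
          simp only [Int.toNat_natCast]
          rw [hv2, if_pos (by omega)]
        refine ⟨by simpa using hL, fun k hk => ?_⟩
        rw [hread, List.getD_eq_getElem?_getD]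
        by_cases hky : k = a.toNat
        · subst hky
          rw [List.getElem?_set_self (by omega), Option.getD_some, if_pos (by omega)]
          rw [show cnt cs a.toNat = cnt cs (a.toNat + 2) + 1 from by rw [cnt, dif_pos hchain]]
          push_cast; ring
        · rw [List.getElem?_set_ne (by omega), ← List.getD_eq_getElem?_getD, hV k hk]
          by_cases hlt : a < (k : Int)
          · rw [if_pos hlt, if_pos (by omega)]
          · rw [if_neg hlt, if_neg (by omega)]
      · next hifc =>
        have hchain : ¬(a.toNat + 4 ≤ cs.length ∧ dnuc cs (a.toNat + 2) = dnuc cs a.toNat) := by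
          intro ⟨_, hd⟩; exact hifc (hcond.mpr hd)
        refine ⟨hL, fun k hk => ?_⟩
        rw [hV k hk]
        by_cases hky : (k : Int) = a
        · rw [if_neg (by omega), if_pos (by omega)]
          have hz : cnt cs k = 0 := by
            rw [cnt, dif_neg (by
              intro hc
              exact hchain (by
                rw [show a.toNat + 2 = k + 2 by omega, show a.toNat = k by omega]
                exact hc))]
          rw [hz]; rfl
        · by_cases hlt : a < (k : Int)
          · rw [if_pos hlt, if_pos (by omega)]
          · rw [if_neg hlt, if_neg (by omega)]

lemma countInv_init (cs : List Char) :
    countInv cs ((cs.length : Int) - 4) (List.replicate cs.length 0) := by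
  refine ⟨by simp, fun k hk => ?_⟩
  rw [List.getD_eq_getElem _ _ (by simpa using hk)]
  simp only [List.getElem_replicate]
  split
  · next hlt => rw [cnt_eq_zero_of_ge cs k (by omega)]; simp
  · rfl

-- ===== VERDICT (by name: the statement is the Claim_ definition above) =====
theorem longest_ssr_spec : Claim_equal_longest_ssr := by
  intro dna _
  unfold Spec_longest_ssr longest_ssr longest_ssr_alt
  simp only []
  set cs := dna.toList with hcs
  have hInv := foldCount cs cs.length ((cs.length : Int) - 4) (List.replicate cs.length 0)
    (by omega) (by omega) (countInv_init cs)
  set count := (PySem.List.pyRange ((cs.length : Int) - 4) (-1) (-1)).foldl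
      (fun (count : List Int) i =>
        if PySem.List.pyGet? cs i = PySem.List.pyGet? cs (i + 2) ∧
           PySem.List.pyGet? cs (i + 1) = PySem.List.pyGet? cs (i + 3)
        then count.set i.toNat (PySem.List.pyGetD count (i + 2) 0 + 1)
        else count) (List.replicate cs.length 0) with hcount
  obtain ⟨hL, hV⟩ := hInv
  congr 1
  apply congrArg
  apply PySem.List.foldl_congr_mem
  intro acc i hi
  rw [PySem.List.mem_pyRange_one] at hi
  have hi2 : i.toNat + 2 ≤ cs.length := by omega
  -- A's repeats = cnt
  have hrep : longestSsrWhile cs i (PySem.List.slice cs (some i) (some (i + 2)))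
      (cs.length + 2) 2 0 = (cnt cs i.toNat : Int) := by
    rw [slice_eq_dnuc cs i hi.1]
    have := whileRun cs i.toNat (cs.length + 2) 0 0 (by omega) (by norm_num) (by omega)
    simp only [Nat.mul_zero, Nat.add_zero] at this
    rw [show ((2 * 0 + 2 : Nat) : Int) = 2 by norm_num, Int.toNat_of_nonneg hi.1] at this
    rw [this]
    ring
  -- B's lookup = cnt
  have hlook : PySem.List.pyGetD count i 0 = (cnt cs i.toNat : Int) := by
    rw [PySem.List.pyGetD_eq_getElem count 0 hi.1 (by omega)]
    have := hV i.toNat (by omega)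
    rw [List.getD_eq_getElem _ _ (by omega)] at this
    rw [this, if_pos (by omega)]
  rw [hrep, hlook]
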